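-- pv_equiv track=rewrite | github.com/KasraK2K/repo-bulletpoint-extractor | tools/formatting.py | normalize_proof_links
-- ===== SOURCE A (Python) =====
-- def normalize_proof_links(text: str, owner: str, repo: str) -> str:
--     if not text or not owner or not repo:
--         return text
--     base = f"https://github.com/{owner}/{repo}/"
--     placeholders = [
--         "https://github.com/project/repo/",
--         "https://github.com/your-org-or-username/your-repo-name/",
--         "https://github.com/org/repo/",
--         "https://github.com/owner/repo/",
--         "https://github.com/${GITHUB_OWNER}/${GITHUB_REPO}/",
--         "https://github.com/${owner}/${repo}/",
--         "https://github.com/<owner>/<repo>/",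
--         "https://github.com/<ORG>/<REPO>/",
--     ]
--     for ph in placeholders:
--         text = text.replace(ph, base)
--     return text
-- ===== SOURCE B (Python) =====
-- import re
--
-- _PLACEHOLDERS = [
--     "https://github.com/project/repo/",
--     "https://github.com/your-org-or-username/your-repo-name/",
--     "https://github.com/org/repo/",
--     "https://github.com/owner/repo/",
--     "https://github.com/${GITHUB_OWNER}/${GITHUB_REPO}/",
--     "https://github.com/${owner}/${repo}/",
--     "https://github.com/<owner>/<repo>/",
--     "https://github.com/<ORG>/<REPO>/",
-- ]
--
-- _PATTERN = re.compile("|".join(re.escape(ph) for ph in _PLACEHOLDERS))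
--
--
-- def normalize_proof_links(text: str, owner: str, repo: str) -> str:
--     if not text or not owner or not repo:
--         return text
--     base = f"https://github.com/{owner}/{repo}/"
--     # single scan: every placeholder occurrence is rewritten to base in one pass
--     return _PATTERN.sub(lambda m: base, text)
-- ===== Notes on version B (the rewrite author's own statement) =====
-- stated objective: alternative
-- what changed: A makes eight sequential full passes over the text (one str.replace per placeholder); B compiles the eight placeholder literals into one escaped alternation regex and rewrites every occurrence in a single left-to-right scan of the text.
import Mathlib
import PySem

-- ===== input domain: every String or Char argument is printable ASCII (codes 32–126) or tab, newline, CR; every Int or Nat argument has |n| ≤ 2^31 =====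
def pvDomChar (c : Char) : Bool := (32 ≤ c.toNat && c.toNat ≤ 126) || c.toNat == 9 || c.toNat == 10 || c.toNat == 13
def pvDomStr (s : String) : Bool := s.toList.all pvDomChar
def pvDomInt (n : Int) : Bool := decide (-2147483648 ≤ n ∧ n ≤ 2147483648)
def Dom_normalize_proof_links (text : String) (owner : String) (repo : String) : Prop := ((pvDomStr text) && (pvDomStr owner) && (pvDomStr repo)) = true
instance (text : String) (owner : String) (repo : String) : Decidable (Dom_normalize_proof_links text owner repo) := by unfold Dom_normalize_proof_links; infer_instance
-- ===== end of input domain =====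

-- B replaces A's eight sequential `str.replace` passes by ONE left-to-right scan (a compiled alternation
-- `re.sub`) that rewrites every placeholder occurrence of the original text once; same return value on Pre_.


-- ===== PORT A =====
def pvPlaceholders : List String :=
  [ "https://github.com/project/repo/",
    "https://github.com/your-org-or-username/your-repo-name/",
    "https://github.com/org/repo/",
    "https://github.com/owner/repo/",
    "https://github.com/${GITHUB_OWNER}/${GITHUB_REPO}/",
    "https://github.com/${owner}/${repo}/",
    "https://github.com/<owner>/<repo>/",
    "https://github.com/<ORG>/<REPO>/" ]

def normalize_proof_links (text : String) (owner : String) (repo : String) : String :=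
  if text = "" ∨ owner = "" ∨ repo = "" then text
  else
    let base := "https://github.com/" ++ owner ++ "/" ++ repo ++ "/"
    pvPlaceholders.foldl (fun t ph => PySem.Str.replace t ph base) text

-- ===== PORT B =====
-- Source B's `_PATTERN.sub(lambda m: base, text)`: `re` with an escaped-literal alternation scans left to right
-- and at each position takes the first alternative (in pattern order) that matches, or copies one char — this
-- scan is that exact behaviour, ported by hand (no regex engine in Lean).
def pvFM (phs : List (List Char)) (l : List Char) : Option (List Char) :=
  phs.find? (fun ph => !ph.isEmpty && ph.isPrefixOf l)

def pvScan (phs : List (List Char)) (base : List Char) : List Char → List Char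
  | [] => []
  | c :: t =>
    match pvFM phs (c :: t) with
    | some ph => base ++ pvScan phs base (t.drop (ph.length - 1))
    | none => c :: pvScan phs base t
termination_by l => l.length
decreasing_by
  · simp only [List.length_cons, List.length_drop]; omega
  · simp only [List.length_cons]; omega

def normalize_proof_links_alt (text : String) (owner : String) (repo : String) : String :=
  if text = "" ∨ owner = "" ∨ repo = "" then text
  else
    let base := "https://github.com/" ++ owner ++ "/" ++ repo ++ "/"
    String.ofList (pvScan (pvPlaceholders.map String.toList) base.toList text.toList)

-- ===== PRECONDITION & SPEC =====
def pvBaseChars (owner : String) (repo : String) : List Char :=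
  "https://github.com/".toList ++ owner.toList ++ ['/'] ++ repo.toList ++ ['/']

-- Pre_ excludes only the inputs where the text contains a placeholder AND the substituted base URL itself
-- OVERLAPS some placeholder string (a placeholder starts inside it, ends inside it, or properly contains /
-- is contained in it): there A's eight sequential passes can cascade through freshly substituted text, so the
-- result is an accident of A's pass order, while B's simultaneous single pass is the equally defensible
-- reading; ordinary owner/repo names (no '/', no URL fragments) always satisfy Pre_.
def Pre_normalize_proof_links (text : String) (owner : String) (repo : String) : Prop :=
  (text = "" ∨ owner = "" ∨ repo = "") ∨
  (∀ ph ∈ pvPlaceholders.map String.toList, ¬ ph <:+: text.toList) ∨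
  ∀ ph ∈ pvPlaceholders.map String.toList,
    (∀ k, k < (pvBaseChars owner repo).length → 0 < k →
        ¬ ph <+: (pvBaseChars owner repo).drop k ∧ ¬ (pvBaseChars owner repo).drop k <+: ph) ∧
    (ph <+: pvBaseChars owner repo → ph = pvBaseChars owner repo) ∧
    (pvBaseChars owner repo <+: ph → ph = pvBaseChars owner repo) ∧
    (∀ j, j < ph.length → 0 < j →
        ¬ ph.drop j <+: pvBaseChars owner repo ∧ ¬ pvBaseChars owner repo <+: ph.drop j)

instance (text : String) (owner : String) (repo : String) : Decidable (Pre_normalize_proof_links text owner repo) := by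
  unfold Pre_normalize_proof_links; infer_instance

def pvWitness_normalize_proof_links : String × String × String :=
  ("x", "octo", "cat")

def Spec_normalize_proof_links (text : String) (owner : String) (repo : String) (out : String) : Prop := out = normalize_proof_links_alt text owner repo
instance (text : String) (owner : String) (repo : String) (out : String) : Decidable (Spec_normalize_proof_links text owner repo out) := by unfold Spec_normalize_proof_links; infer_instance

-- ===== CLAIM (what is proved, stated in full; the proofs are below) =====
def Claim_equal_normalize_proof_links : Prop := ∀ (text : String) (owner : String) (repo : String), Dom_normalize_proof_links text owner repo → Pre_normalize_proof_links text owner repo → Spec_normalize_proof_links text owner repo (normalize_proof_links text owner repo)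

-- ===== LEMMAS AND PROOFS =====

-- the overlap facts the equivalence proof uses: each placeholder of P does not overlap the base b
-- (this is Pre_), the placeholders are nonempty, and no two placeholders overlap each other (decidable).
def pvOv (b : List Char) (P : List (List Char)) : Prop :=
  (∀ ph ∈ P, ph ≠ []) ∧
  (∀ ph ∈ P,
    (∀ k, k < b.length → 0 < k → ¬ ph <+: b.drop k ∧ ¬ b.drop k <+: ph) ∧
    (ph <+: b → ph = b) ∧ (b <+: ph → ph = b) ∧
    (∀ j, j < ph.length → 0 < j → ¬ ph.drop j <+: b ∧ ¬ b <+: ph.drop j)) ∧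
  (∀ ph ∈ P, ∀ ph' ∈ P, (ph <+: ph' → ph = ph') ∧
    (∀ j, j < ph'.length → 0 < j → ¬ ph <+: ph'.drop j ∧ ¬ ph'.drop j <+: ph))

-- structural version of PySem.Chars.replace (old ≠ []), used to reason about port A
def pvRep (old new : List Char) : List Char → List Char
  | [] => []
  | c :: t =>
    if old.isPrefixOf (c :: t) then new ++ pvRep old new (t.drop (old.length - 1))
    else c :: pvRep old new t
termination_by l => l.length
decreasing_by
  · simp only [List.length_cons, List.length_drop]; omega
  · simp only [List.length_cons]; omega

theorem pvRep_nil (old new : List Char) : pvRep old new [] = [] := by simp [pvRep]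

theorem pvNE (l : List Char) (h : l ≠ []) : (!l.isEmpty) = true := by
  rcases l with _ | ⟨a, t⟩
  · exact absurd rfl h
  · rfl

theorem pvPredT (ph l : List Char) (h1 : ph ≠ []) (h2 : ph <+: l) :
    (!ph.isEmpty && ph.isPrefixOf l) = true := by
  simp only [Bool.and_eq_true]
  exact ⟨pvNE ph h1, List.isPrefixOf_iff_prefix.mpr h2⟩

theorem pvPredF (ph l : List Char) (h : ¬ ph <+: l) :
    ¬ (!ph.isEmpty && ph.isPrefixOf l) = true := by
  simp only [Bool.and_eq_true]
  rintro ⟨-, h2⟩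
  exact h (List.isPrefixOf_iff_prefix.mp h2)

theorem pvPredD (ph l : List Char) (h : (!ph.isEmpty && ph.isPrefixOf l) = true) :
    ph ≠ [] ∧ ph <+: l := by
  simp only [Bool.and_eq_true] at h
  refine ⟨?_, List.isPrefixOf_iff_prefix.mp h.2⟩
  rintro rfl
  simp at h

theorem pvRep_pos (old new : List Char) (c : Char) (t : List Char) (hne : old ≠ [])
    (h : old <+: (c :: t)) :
    pvRep old new (c :: t) = new ++ pvRep old new ((c :: t).drop old.length) := by
  rw [pvRep, if_pos (List.isPrefixOf_iff_prefix.mpr h)]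
  rcases old with _ | ⟨a, o⟩
  · exact absurd rfl hne
  · simp

theorem pvRep_neg (old new : List Char) (c : Char) (t : List Char) (h : ¬ old <+: (c :: t)) :
    pvRep old new (c :: t) = c :: pvRep old new t := by
  rw [pvRep, if_neg (fun hh => h (List.isPrefixOf_iff_prefix.mp hh))]

theorem pvReplace_go_eq (old new : List Char) (h : old ≠ []) :
    ∀ fuel l acc, l.length ≤ fuel →
      PySem.Chars.replace.go old new fuel l acc = acc.reverse ++ pvRep old new l := by
  intro fuel
  induction fuel with
  | zero =>
    intro l acc hl
    have : l = [] := List.eq_nil_of_length_eq_zero (Nat.le_zero.mp hl)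
    subst this; simp [PySem.Chars.replace.go, pvRep_nil]
  | succ f ih =>
    intro l acc hl
    rcases l with _ | ⟨c, t⟩
    · simp [PySem.Chars.replace.go, pvRep_nil]
    · rw [PySem.Chars.replace.go]
      by_cases hp : old <+: (c :: t)
      · have hol : 0 < old.length := List.length_pos_of_ne_nil h
        rw [if_pos (List.isPrefixOf_iff_prefix.mpr hp)]
        rw [ih ((c :: t).drop old.length) (new.reverse ++ acc)
            (by simp only [List.length_cons] at hl; simp only [List.length_drop, List.length_cons]; omega)]
        rw [pvRep_pos old new c t h hp]
        simp
      · rw [if_neg (fun hh => hp (List.isPrefixOf_iff_prefix.mp hh))]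
        rw [ih t (c :: acc) (by simp at hl ⊢; omega)]
        rw [pvRep_neg old new c t hp]
        simp

theorem pvReplace_eq (old new s : List Char) (h : old ≠ []) :
    PySem.Chars.replace s old new = pvRep old new s := by
  have : old.isEmpty = false := by rcases old with _ | _ <;> simp_all
  rw [PySem.Chars.replace, this]
  simpa using pvReplace_go_eq old new h s.length s [] (le_refl _)

-- prefix splits over an append
theorem pvPD (x u w : List Char) (h : x <+: u ++ w) : x <+: u ∨ u <+: x :=
  List.prefix_or_prefix_of_prefix h (List.prefix_append u w)

-- first-occurrence decomposition of pvRep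
theorem pvOcc (old new : List Char) (h : old ≠ []) :
    ∀ n t, t.length ≤ n → pvRep old new t = t ∨
      ∃ v z, t = v ++ old ++ z ∧ pvRep old new t = v ++ new ++ pvRep old new z := by
  intro n
  induction n with
  | zero =>
    intro t ht
    have : t = [] := List.eq_nil_of_length_eq_zero (Nat.le_zero.mp ht)
    subst this; left; exact pvRep_nil _ _
  | succ m ih =>
    intro t ht
    rcases t with _ | ⟨c, r⟩
    · left; exact pvRep_nil _ _
    · by_cases hp : old <+: (c :: r)
      · right
        refine ⟨[], (c :: r).drop old.length, ?_, ?_⟩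
        · simp only [List.nil_append]
          exact List.prefix_append_drop hp
        · simp only [List.nil_append]
          exact pvRep_pos old new c r h hp
      · rcases ih r (by simp at ht; omega) with h1 | ⟨v, z, hvz, heq⟩
        · left; rw [pvRep_neg old new c r hp, h1]
        · right
          exact ⟨c :: v, z, by simp [hvz], by rw [pvRep_neg old new c r hp, heq]; simp⟩

-- pvRep skips a region with no occurrence
theorem pvRep_skip (old new : List Char) :
    ∀ v w, (∀ j, j < v.length → ¬ old <+: (v ++ w).drop j) →
      pvRep old new (v ++ w) = v ++ pvRep old new w := by
  intro v
  induction v with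
  | nil => intro w _; simp
  | cons c v ih =>
    intro w hj
    have h0 : ¬ old <+: (c :: (v ++ w)) := by simpa using hj 0 (by simp)
    rw [List.cons_append, pvRep_neg old new c (v ++ w) h0, ih w ?_]
    · simp
    · intro j hjv
      have := hj (j + 1) (by simp; omega)
      simpa using this

-- pvScan equations and pvFM facts
theorem pvScan_nil (phs : List (List Char)) (base : List Char) : pvScan phs base [] = [] := by
  simp [pvScan]

theorem pvFM_some (phs : List (List Char)) (l ph : List Char) (h : pvFM phs l = some ph) :
    ph ∈ phs ∧ ph ≠ [] ∧ ph <+: l := by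
  unfold pvFM at h
  have hpred := pvPredD _ _ (List.find?_eq_some_iff_append.mp h).1
  exact ⟨List.mem_of_find?_eq_some h, hpred.1, hpred.2⟩

theorem pvFM_none (phs : List (List Char)) (l ph : List Char) (h : pvFM phs l = none)
    (hm : ph ∈ phs) (h1 : ph ≠ []) : ¬ ph <+: l := by
  intro hcon
  exact List.find?_eq_none.mp h ph hm (pvPredT ph l h1 hcon)

theorem pvScan_match (phs : List (List Char)) (base l ph : List Char)
    (h : pvFM phs l = some ph) :
    pvScan phs base l = base ++ pvScan phs base (l.drop ph.length) := by
  obtain ⟨-, hne, hp⟩ := pvFM_some phs l ph h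
  rcases l with _ | ⟨c, t⟩
  · exact absurd (List.prefix_nil.mp hp) hne
  · rw [pvScan, h]
    rcases ph with _ | ⟨a, o⟩
    · simp at hne
    · simp

theorem pvScan_none (phs : List (List Char)) (base : List Char) (c : Char) (t : List Char)
    (h : pvFM phs (c :: t) = none) :
    pvScan phs base (c :: t) = c :: pvScan phs base t := by
  rw [pvScan, h]

theorem pvScan_nil_phs (base : List Char) : ∀ t, pvScan [] base t = t := by
  intro t
  induction t with
  | nil => exact pvScan_nil _ _
  | cons c r ih => rw [pvScan_none [] base c r rfl, ih]

-- scanning cannot fire inside the strict interior of b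
theorem pvScan_skip (b : List Char) (P phs : List (List Char)) (hOv : pvOv b P)
    (hsub : phs ⊆ P) :
    ∀ n k u, b.length - k = n → 0 < k → k ≤ b.length →
      pvScan phs b (b.drop k ++ u) = b.drop k ++ pvScan phs b u := by
  intro n
  induction n with
  | zero =>
    intro k u hn _ hk
    have : b.drop k = [] := by
      refine List.drop_eq_nil_iff.mpr ?_
      omega
    simp [this]
  | succ m ih =>
    intro k u hn hk hkb
    have hklt : k < b.length := by omega
    have hcons : b.drop k = b[k] :: b.drop (k + 1) := List.drop_eq_getElem_cons hklt
    have hnone : pvFM phs (b[k] :: (b.drop (k + 1) ++ u)) = none := by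
      refine List.find?_eq_none.mpr ?_
      intro ph hph hcon
      have hpf' : ph <+: b.drop k ++ u := by
        rw [hcons, List.cons_append]
        exact (pvPredD _ _ hcon).2
      rcases pvPD ph (b.drop k) u hpf' with h1 | h1
      · exact ((hOv.2.1 ph (hsub hph)).1 k hklt hk).1 h1
      · exact ((hOv.2.1 ph (hsub hph)).1 k hklt hk).2 h1
    rw [hcons, List.cons_append, pvScan_none phs b _ _ hnone,
      ih (k + 1) u (by omega) (by omega) (by omega), List.cons_append]

theorem pvScan_base (b : List Char) (P phs : List (List Char)) (hOv : pvOv b P)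
    (hsub : phs ⊆ P) (hb : b ≠ []) :
    ∀ u, pvScan phs b (b ++ u) = b ++ pvScan phs b u := by
  intro u
  cases hm : pvFM phs (b ++ u) with
  | some ph =>
    obtain ⟨hmem, hne, hp⟩ := pvFM_some _ _ _ hm
    have hph : ph = b := by
      rcases pvPD ph b u hp with h1 | h1
      · exact (hOv.2.1 ph (hsub hmem)).2.1 h1
      · exact (hOv.2.1 ph (hsub hmem)).2.2.1 h1
    rw [pvScan_match phs b _ ph hm, hph, List.drop_left]
  | none =>
    rcases b with _ | ⟨c, b'⟩
    · simp at hb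
    · rw [List.cons_append, pvScan_none phs _ c _ (by simpa using hm)]
      have := pvScan_skip (c :: b') P phs hOv hsub (c :: b').length.pred 1 u (by simp) (by omega) (by simp)
      simpa using this

-- a replacement pass cannot create a placeholder match at the front
theorem pvNoNew (b : List Char) (P : List (List Char)) (hOv : pvOv b P)
    (ph ph' : List Char) (hph : ph ∈ P) (hph' : ph' ∈ P) (t : List Char)
    (h0 : ¬ ph <+: t) (h1 : ¬ ph' <+: t) : ¬ ph' <+: pvRep ph b t := by
  intro hcon
  have hphne : ph ≠ [] := hOv.1 ph hph
  have hph'ne : ph' ≠ [] := hOv.1 ph' hph'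
  rcases pvOcc ph b hphne t.length t (le_refl _) with heq | ⟨v, z, hvz, heq⟩
  · rw [heq] at hcon; exact h1 hcon
  · rw [heq, List.append_assoc] at hcon
    rcases pvPD ph' v (b ++ pvRep ph b z) hcon with h2 | h2
    · exact h1 (h2.trans (by rw [hvz, List.append_assoc]; exact List.prefix_append _ _))
    · have hs : ph' = v ++ ph'.drop v.length := List.prefix_append_drop h2
      have hvne : v ≠ [] := by
        rintro rfl
        exact h0 (by rw [hvz]; simp only [List.nil_append]; exact List.prefix_append ph z)
      have hsne : ph'.drop v.length ≠ [] := by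
        intro hnil
        rw [hnil, List.append_nil] at hs
        exact h1 (hs ▸ (by rw [hvz, List.append_assoc]; exact List.prefix_append _ _))
      have hjlt : v.length < ph'.length := by
        by_contra hle
        exact hsne (List.drop_eq_nil_iff.mpr (by omega))
      have hjpos : 0 < v.length := List.length_pos_of_ne_nil hvne
      have hdrop : ph'.drop v.length <+: b ++ pvRep ph b z := by
        have hcon2 : v ++ ph'.drop v.length <+: v ++ (b ++ pvRep ph b z) := by
          rw [← hs]; exact hcon
        exact (List.prefix_append_right_inj v).mp hcon2
      rcases pvPD (ph'.drop v.length) b (pvRep ph b z) hdrop with h3 | h3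
      · exact ((hOv.2.1 ph' hph').2.2.2 v.length hjlt hjpos).1 h3
      · exact ((hOv.2.1 ph' hph').2.2.2 v.length hjlt hjpos).2 h3

-- the first match at the front survives replacement behind it
theorem pvFM_stable (b : List Char) (P : List (List Char)) (hOv : pvOv b P) (ph' : List Char)
    (hph' : ph' ∈ P) :
    ∀ phs, phs ⊆ P → ∀ w z, pvFM phs (ph' ++ w) = some ph' → pvFM phs (ph' ++ z) = some ph' := by
  intro phs
  induction phs with
  | nil => intro _ w z h; simp [pvFM] at h
  | cons h rest ih =>
    intro hsub w z hm
    have hph'ne : ph' ≠ [] := (pvFM_some _ _ _ hm).2.1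
    unfold pvFM at hm
    by_cases hpred : (!h.isEmpty && h.isPrefixOf (ph' ++ w)) = true
    · have hfind : List.find? (fun ph => !ph.isEmpty && ph.isPrefixOf (ph' ++ w)) (h :: rest)
          = some h := List.find?_cons_of_pos hpred
      have hh : h = ph' := Option.some.inj (hfind.symm.trans hm)
      subst hh
      unfold pvFM
      exact List.find?_cons_of_pos (pvPredT h (h ++ z) hph'ne (List.prefix_append _ _))
    · have heqw : List.find? (fun ph => !ph.isEmpty && ph.isPrefixOf (ph' ++ w)) (h :: rest)
          = List.find? (fun ph => !ph.isEmpty && ph.isPrefixOf (ph' ++ w)) rest :=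
        List.find?_cons_of_neg hpred
      have hm' : pvFM rest (ph' ++ w) = some ph' := by
        unfold pvFM
        exact heqw.symm.trans hm
      have hpred' : ¬ (!h.isEmpty && h.isPrefixOf (ph' ++ z)) = true := by
        intro hcon
        obtain ⟨hhne, hhp⟩ := pvPredD _ _ hcon
        have hhph' : h = ph' := by
          rcases pvPD h ph' z hhp with h1 | h1
          · exact (hOv.2.2 h (hsub (by simp)) ph' hph').1 h1
          · exact ((hOv.2.2 ph' hph' h (hsub (by simp))).1 h1).symm
        subst hhph'
        exact hpred (pvPredT h (h ++ w) hhne (List.prefix_append _ _))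
      have hih := ih (fun x hx => hsub (by simp [hx])) w z hm'
      unfold pvFM at hih ⊢
      have hstep : List.find? (fun ph => !ph.isEmpty && ph.isPrefixOf (ph' ++ z)) (h :: rest)
          = List.find? (fun ph => !ph.isEmpty && ph.isPrefixOf (ph' ++ z)) rest :=
        List.find?_cons_of_neg hpred'
      exact hstep.trans hih

-- the heart: one sequential pass folded into the simultaneous scan
theorem pvStep (b : List Char) (P : List (List Char)) (hOv : pvOv b P) (hb : b ≠ [])
    (ph : List Char) (hph : ph ∈ P) (phs : List (List Char)) (hsub : phs ⊆ P) :
    ∀ n t, t.length ≤ n → pvScan (ph :: phs) b t = pvScan phs b (pvRep ph b t) := by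
  have hsub' : (ph :: phs) ⊆ P := by
    intro x hx; rcases hx with _ | hx
    · exact hph
    · exact hsub (by assumption)
  have hphne : ph ≠ [] := hOv.1 ph hph
  intro n
  induction n with
  | zero =>
    intro t ht
    have : t = [] := List.eq_nil_of_length_eq_zero (Nat.le_zero.mp ht)
    subst this; rw [pvRep_nil, pvScan_nil, pvScan_nil]
  | succ m ih =>
    intro t ht
    rcases t with _ | ⟨c, r⟩
    · rw [pvRep_nil, pvScan_nil, pvScan_nil]
    · by_cases hp : ph <+: (c :: r)
      · -- A: the pass's own placeholder matches here
        have hm : pvFM (ph :: phs) (c :: r) = some ph := by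
          unfold pvFM
          exact List.find?_cons_of_pos (pvPredT ph (c :: r) hphne hp)
        rw [pvScan_match _ _ _ _ hm]
        rw [pvRep_pos ph b c r hphne hp]
        rw [pvScan_base b P phs hOv hsub hb]
        have hl1 : 0 < ph.length := List.length_pos_of_ne_nil hphne
        rw [ih ((c :: r).drop ph.length) (by
          simp only [List.length_cons] at ht
          simp only [List.length_drop, List.length_cons]
          omega)]
      · cases hm : pvFM phs (c :: r) with
        | some ph' =>
          -- B: a later placeholder matches here
          obtain ⟨hmem, hph'ne, hp'⟩ := pvFM_some _ _ _ hm
          have hmemP : ph' ∈ P := hsub hmem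
          have hm1 : pvFM (ph :: phs) (c :: r) = some ph' := by
            unfold pvFM at hm ⊢
            have hstep : List.find? (fun q => !q.isEmpty && q.isPrefixOf (c :: r)) (ph :: phs)
                = List.find? (fun q => !q.isEmpty && q.isPrefixOf (c :: r)) phs :=
              List.find?_cons_of_neg (pvPredF ph (c :: r) hp)
            exact hstep.trans hm
          have hsplit : (c :: r) = ph' ++ (c :: r).drop ph'.length := List.prefix_append_drop hp'
          set w := (c :: r).drop ph'.length with hw
          have hrep : pvRep ph b (c :: r) = ph' ++ pvRep ph b w := by
            conv_lhs => rw [hsplit]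
            refine pvRep_skip ph b ph' w ?_
            intro j hj
            rcases Nat.eq_zero_or_pos j with rfl | hjpos
            · rw [← hsplit]; simpa using hp
            · rw [List.drop_append_of_le_length (by omega)]
              intro hcon
              rcases pvPD ph (ph'.drop j) w hcon with h1 | h1
              · exact ((hOv.2.2 ph hph ph' hmemP).2 j hj hjpos).1 h1
              · exact ((hOv.2.2 ph hph ph' hmemP).2 j hj hjpos).2 h1
          have hm2 : pvFM phs (ph' ++ pvRep ph b w) = some ph' := by
            refine pvFM_stable b P hOv ph' hmemP phs hsub w (pvRep ph b w) ?_
            rw [← hsplit]; exact hm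
          rw [pvScan_match _ _ _ _ hm1, hrep, pvScan_match _ _ _ _ hm2, List.drop_left]
          have hl1 : 0 < ph'.length := List.length_pos_of_ne_nil hph'ne
          rw [ih w (by
            simp only [List.length_cons] at ht
            simp only [hw, List.length_drop, List.length_cons]
            omega)]
        | none =>
          -- C: no placeholder matches here
          have hm1 : pvFM (ph :: phs) (c :: r) = none := by
            unfold pvFM at hm ⊢
            have hstep : List.find? (fun q => !q.isEmpty && q.isPrefixOf (c :: r)) (ph :: phs)
                = List.find? (fun q => !q.isEmpty && q.isPrefixOf (c :: r)) phs :=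
              List.find?_cons_of_neg (pvPredF ph (c :: r) hp)
            exact hstep.trans hm
          rw [pvScan_none _ _ _ _ hm1]
          rw [pvRep_neg ph b c r hp]
          have hm2 : pvFM phs (c :: pvRep ph b r) = none := by
            refine List.find?_eq_none.mpr ?_
            intro ph' hmem hcon
            obtain ⟨hph'ne, hcon'⟩ := pvPredD _ _ hcon
            have hrepr : (c :: pvRep ph b r) = pvRep ph b (c :: r) := (pvRep_neg ph b c r hp).symm
            rw [hrepr] at hcon'
            exact pvNoNew b P hOv ph ph' hph (hsub hmem) (c :: r) hp
              (pvFM_none phs (c :: r) ph' hm hmem hph'ne) hcon'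
          rw [pvScan_none _ _ _ _ hm2]
          rw [ih r (by simp at ht; omega)]

theorem pvFold (b : List Char) (P : List (List Char)) (hOv : pvOv b P) (hb : b ≠ []) :
    ∀ phs, phs ⊆ P → ∀ t, phs.foldl (fun t ph => pvRep ph b t) t = pvScan phs b t := by
  intro phs
  induction phs with
  | nil => intro _ t; simp [pvScan_nil_phs]
  | cons ph rest ih =>
    intro hsub t
    have hph : ph ∈ P := hsub (by simp)
    have hrest : rest ⊆ P := fun x hx => hsub (by simp [hx])
    rw [List.foldl_cons, ih hrest (pvRep ph b t)]
    exact (pvStep b P hOv hb ph hph rest hrest t.length t (le_refl _)).symm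

-- string-level fold bridged to list level
theorem pvFoldStr (phsS : List String) (bS : String) :
    ∀ s : String, ((phsS.foldl (fun t ph => PySem.Str.replace t ph bS) s).toList)
      = (phsS.map String.toList).foldl (fun t ph => PySem.Chars.replace t ph bS.toList) s.toList := by
  induction phsS with
  | nil => intro s; simp
  | cons ph rest ih =>
    intro s
    simp only [List.foldl_cons, List.map_cons]
    rw [ih, PySem.Str.toList_replace]

-- identity passes when the text contains no placeholder occurrence at all
theorem pvRep_id (old new : List Char) (h0 : old ≠ []) :
    ∀ t, ¬ old <:+: t → pvRep old new t = t := by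
  intro t hinf
  rcases pvOcc old new h0 t.length t (le_refl _) with h | ⟨v, z, hvz, -⟩
  · exact h
  · exact absurd ⟨v, z, hvz.symm⟩ hinf

theorem pvScan_id (b : List Char) (phs : List (List Char)) :
    ∀ t, (∀ ph ∈ phs, ¬ ph <:+: t) → pvScan phs b t = t := by
  intro t
  induction t with
  | nil => intro _; exact pvScan_nil _ _
  | cons c r ih =>
    intro h
    have hm : pvFM phs (c :: r) = none := by
      refine List.find?_eq_none.mpr ?_
      intro ph hmem hcon
      exact h ph hmem (pvPredD _ _ hcon).2.isInfix
    rw [pvScan_none _ _ _ _ hm, ih (fun ph hmem hinf => h ph hmem (List.infix_cons hinf))]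

theorem pvFoldId (b : List Char) (t : List Char) :
    ∀ phs : List (List Char), (∀ ph ∈ phs, ph ≠ [] ∧ ¬ ph <:+: t) →
      phs.foldl (fun t ph => pvRep ph b t) t = t := by
  intro phs
  induction phs with
  | nil => intro _; rfl
  | cons ph rest ih =>
    intro h
    have h1 := h ph (by simp)
    simp only [List.foldl_cons]
    rw [pvRep_id ph b h1.1 t h1.2]
    exact ih (fun x hx => h x (by simp [hx]))

-- concrete facts about the placeholder list
theorem pvPhNonempty : ∀ ph ∈ pvPlaceholders.map String.toList, ph ≠ [] := by decide

theorem pvPhPairwise : ∀ ph ∈ pvPlaceholders.map String.toList, ∀ ph' ∈ pvPlaceholders.map String.toList,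
    (ph <+: ph' → ph = ph') ∧
    (∀ j, j < ph'.length → 0 < j → ¬ ph <+: ph'.drop j ∧ ¬ ph'.drop j <+: ph) := by decide

theorem pvBase_toList (owner repo : String) :
    ("https://github.com/" ++ owner ++ "/" ++ repo ++ "/").toList = pvBaseChars owner repo := by
  simp [pvBaseChars, String.toList_append]

theorem pvBase_ne_nil (owner repo : String) : pvBaseChars owner repo ≠ [] := by
  unfold pvBaseChars
  simp

-- ===== VERDICT (by name: the statement is the Claim_ definition above) =====
theorem normalize_proof_links_spec : Claim_equal_normalize_proof_links := by
  unfold Claim_equal_normalize_proof_links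
  intro text owner repo hdom hpre
  unfold Spec_normalize_proof_links
  unfold normalize_proof_links normalize_proof_links_alt
  by_cases hg : text = "" ∨ owner = "" ∨ repo = ""
  · simp [hg]
  · simp only [hg, if_false]
    set bS := "https://github.com/" ++ owner ++ "/" ++ repo ++ "/" with hbS
    have hb : bS.toList = pvBaseChars owner repo := pvBase_toList owner repo
    have hchars : ∀ phs : List (List Char), phs ⊆ pvPlaceholders.map String.toList → ∀ s : List Char,
        phs.foldl (fun t ph => PySem.Chars.replace t ph bS.toList) s
          = phs.foldl (fun t ph => pvRep ph bS.toList t) s := by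
      intro phs
      induction phs with
      | nil => intro _ s; rfl
      | cons ph rest ih =>
        intro hsub s
        simp only [List.foldl_cons]
        rw [pvReplace_eq ph bS.toList s (pvPhNonempty ph (hsub (by simp))),
          ih (fun x hx => hsub (by simp [hx]))]
    have hAlist : ∀ res : List Char,
        (pvPlaceholders.map String.toList).foldl (fun t ph => pvRep ph bS.toList t) text.toList = res →
        pvScan (pvPlaceholders.map String.toList) bS.toList text.toList = res →
        pvPlaceholders.foldl (fun t ph => PySem.Str.replace t ph bS) text
          = String.ofList (pvScan (pvPlaceholders.map String.toList) bS.toList text.toList) := by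
      intro res hA hB
      have h1 : (pvPlaceholders.foldl (fun t ph => PySem.Str.replace t ph bS) text).toList = res := by
        rw [pvFoldStr, hchars _ (fun x hx => hx), hA]
      calc pvPlaceholders.foldl (fun t ph => PySem.Str.replace t ph bS) text
          = String.ofList (pvPlaceholders.foldl (fun t ph => PySem.Str.replace t ph bS) text).toList := by
            rw [String.ofList_toList]
        _ = String.ofList (pvScan (pvPlaceholders.map String.toList) bS.toList text.toList) := by
            rw [h1, hB]
    rcases hpre with hg' | hocc | hov
    · exact absurd hg' hg
    · -- no placeholder occurs in the text: both sides leave it unchanged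
      refine hAlist text.toList ?_ ?_
      · exact pvFoldId bS.toList text.toList _ (fun ph hm => ⟨pvPhNonempty ph hm, hocc ph hm⟩)
      · exact pvScan_id bS.toList _ text.toList hocc
    · -- the base URL overlaps no placeholder: the sequential passes fuse into the single scan
      have hOv : pvOv bS.toList (pvPlaceholders.map String.toList) := by
        refine ⟨pvPhNonempty, ?_, pvPhPairwise⟩
        rw [hb]
        exact hov
      have hbne : bS.toList ≠ [] := by rw [hb]; exact pvBase_ne_nil owner repo
      exact hAlist (pvScan (pvPlaceholders.map String.toList) bS.toList text.toList)
        (pvFold bS.toList (pvPlaceholders.map String.toList) hOv hbne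
          (pvPlaceholders.map String.toList) (fun x hx => hx) text.toList) rfl
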